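-- pv_equiv track=rewrite | github.com/OSGeo/grass-addons | grass7/vector/v.stats/imp_csv.py | gettablecols
-- ===== SOURCE A (Python) =====
-- NPY2COLTYPE = {'<i8': 'INTEGER',
--                '<f8': 'DOUBLE'}
--
-- def getcols(names, types, skipnames=None, prefix='',
--             gettype=lambda x: x):
--     cols = []
--     skipnames = skipnames if skipnames else []
--     for cname, ctype in zip(names, types):
--         if cname not in skipnames:
--             cols.append((prefix + cname, gettype(ctype)))
--     return cols
--
-- def gettablecols(prefixes, allshpn, allshpt, skipshp,
--                  allrstn, allrstt, skiprst):
--     gettype = lambda x: NPY2COLTYPE[x]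
--     # define the new columns
--     cols = getcols(allshpn, allshpt, skipshp, gettype=gettype)
--     for prfx in prefixes:
--         cols += getcols(allrstn, allrstt, skiprst,
--                         prefix=prfx, gettype=gettype)
--     return cols
-- ===== SOURCE B (Python) =====
-- NPY2COLTYPE = {'<i8': 'INTEGER',
--                '<f8': 'DOUBLE'}
--
--
-- def gettablecols(prefixes, allshpn, allshpt, skipshp,
--                  allrstn, allrstt, skiprst):
--     cols = [(name, NPY2COLTYPE[ctype])
--             for name, ctype in zip(allshpn, allshpt)
--             if name not in skipshp]
--     if not prefixes:
--         return cols
--     # raster column table computed once, each prefix applied by a cheap map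
--     base = [(name, NPY2COLTYPE[ctype])
--             for name, ctype in zip(allrstn, allrstt)
--             if name not in skiprst]
--     return cols + [(prfx + name, coltype)
--                    for prfx in prefixes
--                    for name, coltype in base]
-- ===== Notes on version B (the rewrite author's own statement) =====
-- stated objective: faster
-- what changed: B precomputes the filtered (name, coltype) raster table once (skip-list filtering and NPY2COLTYPE lookups done a single time) and applies every prefix with a plain string-concatenation map over that table, instead of A's per-prefix re-scan of the raster name/type lists through the getcols helper; the shapefile pass is one comprehension and the whole result is built by list concatenation instead of repeated in-place appends.
import Mathlib
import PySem

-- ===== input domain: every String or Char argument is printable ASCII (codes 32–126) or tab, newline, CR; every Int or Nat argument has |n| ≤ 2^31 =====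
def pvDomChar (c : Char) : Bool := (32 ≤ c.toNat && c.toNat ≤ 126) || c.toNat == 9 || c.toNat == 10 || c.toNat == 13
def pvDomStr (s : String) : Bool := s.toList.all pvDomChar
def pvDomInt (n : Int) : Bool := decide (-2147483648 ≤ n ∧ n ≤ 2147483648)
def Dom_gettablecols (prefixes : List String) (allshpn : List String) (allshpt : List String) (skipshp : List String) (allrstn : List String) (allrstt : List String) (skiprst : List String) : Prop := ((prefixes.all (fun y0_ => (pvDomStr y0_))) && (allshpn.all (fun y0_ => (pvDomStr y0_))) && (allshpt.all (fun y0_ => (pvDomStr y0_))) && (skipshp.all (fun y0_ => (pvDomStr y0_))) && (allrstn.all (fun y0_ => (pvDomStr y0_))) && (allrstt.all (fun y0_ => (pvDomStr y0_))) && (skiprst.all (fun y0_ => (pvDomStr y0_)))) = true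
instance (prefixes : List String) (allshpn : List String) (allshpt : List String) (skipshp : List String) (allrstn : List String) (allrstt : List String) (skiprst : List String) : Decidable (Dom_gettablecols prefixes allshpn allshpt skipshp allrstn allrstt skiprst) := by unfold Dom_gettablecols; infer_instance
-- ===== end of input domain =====

-- B computes the filtered raster column table once and applies each prefix by a map,
-- instead of A's per-prefix re-scan of the raster lists through the getcols helper.
-- ===== PORT A =====
-- NPY2COLTYPE[x]; Python raises KeyError on other keys: the port returns "" there and
-- Pre_gettablecols excludes exactly those inputs.
def npy2coltype (x : String) : Option String :=
  if x = "<i8" then some "INTEGER" else if x = "<f8" then some "DOUBLE" else none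

-- getcols(names, types, skipnames, prefix, gettype=NPY2COLTYPE lookup)
def getcolsA (names types skipnames : List String) (pfx : String) : List (String × String) :=
  (names.zip types).foldl
    (fun cols p =>
      if skipnames.contains p.1 then cols
      else cols ++ [(pfx ++ p.1, (npy2coltype p.2).getD "")])
    []

def gettablecols (prefixes : List String) (allshpn : List String) (allshpt : List String) (skipshp : List String) (allrstn : List String) (allrstt : List String) (skiprst : List String) : List (String × String) :=
  let cols := getcolsA allshpn allshpt skipshp ""
  prefixes.foldl (fun cols prfx => cols ++ getcolsA allrstn allrstt skiprst prfx) cols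

-- ===== PORT B =====
-- the NPY2COLTYPE dict as the association list it is in Source B (KeyError → "")
def coltypeB (t : String) : String :=
  ((PySem.Dict.mk [("<i8", "INTEGER"), ("<f8", "DOUBLE")]).get? t).getD ""

-- one filtered pass: the comprehension over zip(names, types), built front-to-back
def colsB : List String → List String → List String → List (String × String)
  | [], _, _ => []
  | _, [], _ => []
  | n :: ns, t :: ts, skip =>
    if n ∈ skip then colsB ns ts skip
    else (n, coltypeB t) :: colsB ns ts skip

-- the double comprehension: every prefix applied over the precomputed base table
def withPrefixes : List String → List (String × String) → List (String × String)
  | [], _ => []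
  | prfx :: rest, base =>
    base.map (fun q => (prfx ++ q.1, q.2)) ++ withPrefixes rest base

def gettablecols_alt (prefixes : List String) (allshpn : List String) (allshpt : List String) (skipshp : List String) (allrstn : List String) (allrstt : List String) (skiprst : List String) : List (String × String) :=
  let cols := colsB allshpn allshpt skipshp
  match prefixes with
  | [] => cols
  | ps => cols ++ withPrefixes ps (colsB allrstn allrstt skiprst)

-- ===== PRECONDITION & SPEC =====
-- Pre_ excludes exactly the inputs where Python A raises KeyError: a non-skipped column
-- whose type string is not a NPY2COLTYPE key (raster columns only matter if some prefix exists).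
def Pre_gettablecols (prefixes : List String) (allshpn : List String) (allshpt : List String) (skipshp : List String) (allrstn : List String) (allrstt : List String) (skiprst : List String) : Prop :=
  (∀ p ∈ allshpn.zip allshpt, ¬ skipshp.contains p.1 → (p.2 = "<i8" ∨ p.2 = "<f8")) ∧
  (prefixes ≠ [] → ∀ p ∈ allrstn.zip allrstt, ¬ skiprst.contains p.1 → (p.2 = "<i8" ∨ p.2 = "<f8"))
instance (prefixes : List String) (allshpn : List String) (allshpt : List String) (skipshp : List String) (allrstn : List String) (allrstt : List String) (skiprst : List String) : Decidable (Pre_gettablecols prefixes allshpn allshpt skipshp allrstn allrstt skiprst) := by unfold Pre_gettablecols; infer_instance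

def pvWitness_gettablecols : List String × List String × List String × List String × List String × List String × List String :=
  (["p_"], ["a", "b"], ["<i8", "<f8"], ["b"], ["x"], ["<f8"], [])

def Spec_gettablecols (prefixes : List String) (allshpn : List String) (allshpt : List String) (skipshp : List String) (allrstn : List String) (allrstt : List String) (skiprst : List String) (out : List (String × String)) : Prop := out = gettablecols_alt prefixes allshpn allshpt skipshp allrstn allrstt skiprst
instance (prefixes : List String) (allshpn : List String) (allshpt : List String) (skipshp : List String) (allrstn : List String) (allrstt : List String) (skiprst : List String) (out : List (String × String)) : Decidable (Spec_gettablecols prefixes allshpn allshpt skipshp allrstn allrstt skiprst out) := by unfold Spec_gettablecols; infer_instance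

-- ===== CLAIM =====
def Claim_equal_gettablecols : Prop := ∀ (prefixes : List String) (allshpn : List String) (allshpt : List String) (skipshp : List String) (allrstn : List String) (allrstt : List String) (skiprst : List String), Dom_gettablecols prefixes allshpn allshpt skipshp allrstn allrstt skiprst → Pre_gettablecols prefixes allshpn allshpt skipshp allrstn allrstt skiprst → Spec_gettablecols prefixes allshpn allshpt skipshp allrstn allrstt skiprst (gettablecols prefixes allshpn allshpt skipshp allrstn allrstt skiprst)

-- ===== LEMMAS AND PROOFS =====

-- the two type lookups agree on every string
theorem coltypeB_eq (t : String) : coltypeB t = (npy2coltype t).getD "" := by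
  unfold coltypeB npy2coltype
  by_cases h1 : t = "<i8"
  · subst h1
    simp [PySem.Dict.get?_mk_cons]
  · by_cases h2 : t = "<f8"
    · subst h2
      simp [PySem.Dict.get?_mk_cons]
    · have b1 : (("<i8" : String) == t) = false := by
        simpa using fun h => h1 h.symm
      have b2 : (("<f8" : String) == t) = false := by
        simpa using fun h => h2 h.symm
      simp [b1, b2, h1, h2, PySem.Dict.get?]

-- A's accumulating append-fold equals acc ++ the direct cons-built list with the prefix applied
theorem getcolsA_aux (l : List (String × String)) (skipnames : List String)
    (pfx : String) (acc : List (String × String)) :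
    l.foldl
      (fun cols p =>
        if p.1 ∈ skipnames then cols
        else cols ++ [(pfx ++ p.1, (npy2coltype p.2).getD "")]) acc
    = acc ++ l.filterMap
        (fun p => if p.1 ∈ skipnames then none
                  else some (pfx ++ p.1, (npy2coltype p.2).getD "")) := by
  induction l generalizing acc with
  | nil => simp
  | cons h t ih =>
    by_cases hc : h.1 ∈ skipnames <;>
      simp [List.foldl_cons, hc, ih]

-- B's two-list recursion computes the zip/filterMap view
theorem colsB_eq (names types skipnames : List String) :
    colsB names types skipnames
      = (names.zip types).filterMap
          (fun p => if p.1 ∈ skipnames then none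
                    else some (p.1, (npy2coltype p.2).getD "")) := by
  induction names generalizing types with
  | nil => simp [colsB]
  | cons n ns ih =>
    cases types with
    | nil => simp [colsB]
    | cons t ts =>
      by_cases hc : n ∈ skipnames <;>
        simp [colsB, hc, ih, coltypeB_eq]

theorem getcolsA_eq_map (names types skipnames : List String) (pfx : String) :
    getcolsA names types skipnames pfx
      = (colsB names types skipnames).map (fun q => (pfx ++ q.1, q.2)) := by
  unfold getcolsA
  simp only [List.contains_eq_mem, decide_eq_true_eq]
  rw [getcolsA_aux, List.nil_append, colsB_eq, List.map_filterMap]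
  congr 1
  funext p
  by_cases hc : p.1 ∈ skipnames <;> simp [hc]

theorem withPrefixes_eq (ps : List String) (base : List (String × String)) :
    withPrefixes ps base
      = ps.flatMap (fun prfx => base.map (fun q => (prfx ++ q.1, q.2))) := by
  induction ps with
  | nil => simp [withPrefixes]
  | cons p pt ih => simp [withPrefixes, ih]

theorem foldl_prefixes (allrstn allrstt skiprst : List String)
    (ps : List String) (init : List (String × String)) :
    ps.foldl (fun cols prfx => cols ++ getcolsA allrstn allrstt skiprst prfx) init
      = init ++ withPrefixes ps (colsB allrstn allrstt skiprst) := by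
  rw [withPrefixes_eq]
  induction ps generalizing init with
  | nil => simp
  | cons p pt ih => simp [List.foldl_cons, getcolsA_eq_map, List.flatMap_def]

theorem getcolsA_empty_pfx (names types skipnames : List String) :
    getcolsA names types skipnames "" = colsB names types skipnames := by
  rw [getcolsA_eq_map]; simp

-- ===== VERDICT =====
theorem gettablecols_spec : Claim_equal_gettablecols := by
  intro prefixes allshpn allshpt skipshp allrstn allrstt skiprst _ _
  unfold Spec_gettablecols gettablecols gettablecols_alt
  rw [getcolsA_empty_pfx, foldl_prefixes]
  cases prefixes <;> simp [withPrefixes]
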